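-- pv_equiv track=rewrite | github.com/Shiv2157k/LeetCode2024 | microsoft_revisited/hashing/CountUniqueCharactersOfAllSubStringsOfAGivenString.py | count_unique_letter_string
-- ===== SOURCE A (Python) =====
-- def count_unique_letter_string(s: str) -> int:
--     """
--     Approach: Hash Bucket
--     T: O(N)
--     S: O(N)
--     :param s:
--     :return:
--     """
--
--     mod: int = 10 ** 7
--     n: int = len(s)
--
--     bucket = [[-1] for _ in range(26)]
--
--     for i in range(n):
--         bucket[ord(s[i]) - ord('A')].append(i)
--
--     for i in range(len(bucket)):
--         bucket[i].append(n)
--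
--     count = 0
--
--     for i in range(len(bucket)):
--         for j in range(1, len(bucket[i]) - 1):
--             count += (bucket[i][j] - bucket[i][j - 1]) * (bucket[i][j + 1] - bucket[i][j])
--     return count % mod
-- ===== SOURCE B (Python) =====
-- def count_unique_letter_string(s: str) -> int:
--     # One pass with two 26-slot arrays (last and second-to-last occurrence per
--     # bucket) instead of building per-bucket occurrence lists first.
--     # Indexing last/prev by ord(c) - ord('A') reproduces A's bucket addressing
--     # (including Python's negative-index behaviour and IndexError range).
--     last = [-1] * 26
--     prev = [-1] * 26
--     count = 0
--     for i, ch in enumerate(s):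
--         c = ord(ch) - ord('A')
--         j = last[c]
--         k = prev[c]
--         count += (j - k) * (i - j)
--         prev[c] = j
--         last[c] = i
--     n = len(s)
--     for c in range(26):
--         count += (n - last[c]) * (last[c] - prev[c])
--     return count % (10 ** 7)
-- ===== Notes on version B (the rewrite author's own statement) =====
-- stated objective: simpler
-- what changed: B replaces A's per-bucket occurrence lists (built in one pass, then summed bucket by bucket with an indexed inner loop) by a single pass that keeps only the last and second-to-last occurrence per 26-slot bucket and accumulates each gap product as it closes, plus one 26-step closing loop.
import Mathlib
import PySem

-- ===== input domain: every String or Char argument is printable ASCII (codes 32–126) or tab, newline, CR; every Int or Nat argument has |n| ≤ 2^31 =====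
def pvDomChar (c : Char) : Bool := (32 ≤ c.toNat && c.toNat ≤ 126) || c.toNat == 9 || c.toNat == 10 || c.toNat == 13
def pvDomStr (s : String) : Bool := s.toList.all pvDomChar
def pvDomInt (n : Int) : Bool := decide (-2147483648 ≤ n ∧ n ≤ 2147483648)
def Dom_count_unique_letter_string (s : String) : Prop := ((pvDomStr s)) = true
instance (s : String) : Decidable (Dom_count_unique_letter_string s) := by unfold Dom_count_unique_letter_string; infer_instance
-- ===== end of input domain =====

-- B replaces A's per-bucket occurrence lists (built first, summed afterwards) by a single
-- pass keeping only the last and second-to-last occurrence per bucket; same return value.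

-- ===== PORT A =====
-- loop body of "for i in range(n): bucket[ord(s[i]) - ord('A')].append(i)"
-- (iteration over range(n) with s[i] is transliterated as iteration over enumerate(s);
--  bucket[idx] with a possibly negative idx is pyGetD/pySetD — Python's negative-index rule,
--  total form, exact under Pre_ below)
def pvStepA (bk : List (List Int)) (p : Int × Char) : List (List Int) :=
  PySem.List.pySetD bk ((p.2.toNat : Int) - 65)
    (PySem.List.pyGetD bk ((p.2.toNat : Int) - 65) [] ++ [p.1])

-- inner loop "for j in range(1, len(bucket[i]) - 1): count += ..."
def pvInnerA (b : List Int) (acc : Int) : Int :=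
  (PySem.List.pyRange 1 ((b.length : Int) - 1) 1).foldl
    (fun acc2 j =>
      acc2 + (PySem.List.pyGetD b j 0 - PySem.List.pyGetD b (j - 1) 0)
           * (PySem.List.pyGetD b (j + 1) 0 - PySem.List.pyGetD b j 0)) acc

def count_unique_letter_string (s : String) : Int :=
  let n : Int := (s.toList.length : Int)
  let bucket : List (List Int) :=
    (PySem.List.enumerate s.toList 0).foldl pvStepA ((List.range 26).map fun _ => [(-1 : Int)])
  -- "for i in range(len(bucket)): bucket[i].append(n)"
  let bucket2 : List (List Int) := bucket.map (fun b => b ++ [n])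
  let count : Int :=
    (PySem.List.pyRange 0 (bucket2.length : Int) 1).foldl
      (fun acc i => pvInnerA (PySem.List.pyGetD bucket2 i []) acc) 0
  PySem.Int.mod count (10 ^ 7)

-- ===== PORT B =====
-- loop body of B's single pass; state = (last, prev, count)
def pvStepB (st : List Int × List Int × Int) (p : Int × Char) : List Int × List Int × Int :=
  let c : Int := (p.2.toNat : Int) - 65
  let j := PySem.List.pyGetD st.1 c 0
  let k := PySem.List.pyGetD st.2.1 c 0
  (PySem.List.pySetD st.1 c p.1, PySem.List.pySetD st.2.1 c j,
   st.2.2 + (j - k) * (p.1 - j))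

def count_unique_letter_string_alt (s : String) : Int :=
  let st := (PySem.List.enumerate s.toList 0).foldl pvStepB
              (List.replicate 26 (-1), List.replicate 26 (-1), 0)
  let n : Int := (s.toList.length : Int)
  let count : Int :=
    (PySem.List.pyRange 0 26 1).foldl
      (fun acc c => acc + (n - PySem.List.pyGetD st.1 c 0)
                        * (PySem.List.pyGetD st.1 c 0 - PySem.List.pyGetD st.2.1 c 0)) st.2.2
  PySem.Int.mod count (10 ^ 7)

-- ===== PRECONDITION & SPEC =====
-- Pre_ excludes exactly the strings containing a character whose code is outside 39..90:
-- there A's bucket index ord(c)-65 falls outside [-26, 25] and Python raises IndexError.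
def Pre_count_unique_letter_string (s : String) : Prop :=
  (s.toList.all (fun c => 39 ≤ c.toNat && c.toNat ≤ 90)) = true
instance (s : String) : Decidable (Pre_count_unique_letter_string s) := by
  unfold Pre_count_unique_letter_string; infer_instance
def pvWitness_count_unique_letter_string : String := "A"

def Spec_count_unique_letter_string (s : String) (out : Int) : Prop := out = count_unique_letter_string_alt s
instance (s : String) (out : Int) : Decidable (Spec_count_unique_letter_string s out) := by unfold Spec_count_unique_letter_string; infer_instance

-- ===== CLAIM (what is proved, stated in full; the proofs are below) =====
def Claim_equal_count_unique_letter_string : Prop := ∀ (s : String), Dom_count_unique_letter_string s → Pre_count_unique_letter_string s → Spec_count_unique_letter_string s (count_unique_letter_string s)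

-- ===== LEMMAS AND PROOFS =====

-- the bucket slot a character of code 39..90 lands in (Python's negative-index wrap)
def pvCIdx (ch : Char) : Nat := if 65 ≤ ch.toNat then ch.toNat - 65 else ch.toNat - 39

lemma pvCIdx_lt (ch : Char) (h1 : 39 ≤ ch.toNat) (h2 : ch.toNat ≤ 90) : pvCIdx ch < 26 := by
  unfold pvCIdx; split <;> omega

lemma pvPyGetD_code {α : Type} (xs : List α) (d : α) (hlen : xs.length = 26) (ch : Char)
    (h1 : 39 ≤ ch.toNat) (h2 : ch.toNat ≤ 90) :
    PySem.List.pyGetD xs ((ch.toNat : Int) - 65) d = xs.getD (pvCIdx ch) d := by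
  unfold pvCIdx
  by_cases h : 65 ≤ ch.toNat
  · have : ((ch.toNat : Int) - 65) = ((ch.toNat - 65 : Nat) : Int) := by omega
    rw [this, PySem.List.pyGetD_natCast, if_pos h]
  · have hk1 : 0 < 65 - ch.toNat := by omega
    have hk2 : 65 - ch.toNat ≤ xs.length := by omega
    have : ((ch.toNat : Int) - 65) = -((65 - ch.toNat : Nat) : Int) := by omega
    rw [this, PySem.List.pyGetD_neg_natCast xs _ d hk1 hk2, if_neg h]
    have hlt : ch.toNat - 39 < xs.length := by omega
    have heq : xs.length - (65 - ch.toNat) = ch.toNat - 39 := by omega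
    rw [List.getD_eq_getElem?_getD, List.getElem?_eq_getElem hlt]
    exact getElem_congr_idx heq

lemma pvPySetD_code {α : Type} (xs : List α) (v : α) (hlen : xs.length = 26) (ch : Char)
    (h1 : 39 ≤ ch.toNat) (h2 : ch.toNat ≤ 90) :
    PySem.List.pySetD xs ((ch.toNat : Int) - 65) v = xs.set (pvCIdx ch) v := by
  unfold pvCIdx
  by_cases h : 65 ≤ ch.toNat
  · have h0 : (0:Int) ≤ (ch.toNat : Int) - 65 := by omega
    rw [PySem.List.pySetD_of_nonneg xs v h0, if_pos h]
    congr 1; omega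
  · rw [if_neg h]
    simp only [PySem.List.pySetD, PySem.List.pySet?, PySem.List.pyIdx?]
    have hneg : ¬ (0:Int) ≤ (ch.toNat : Int) - 65 := by omega
    have hge : -(xs.length : Int) ≤ (ch.toNat : Int) - 65 := by omega
    rw [if_neg hneg, if_pos hge]
    simp only [Option.map_some, Option.getD_some]
    congr 1; omega

-- sum of (b[j]-b[j-1])*(b[j+1]-b[j]) over all consecutive triples, structurally
def pvTriple : List Int → Int
  | a :: b :: c :: t => (b - a) * (c - b) + pvTriple (b :: c :: t)
  | _ => 0

def pvLastD (l : List Int) : Int := l.getLastD (-1)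
def pvPrevD (l : List Int) : Int := l.dropLast.getLastD (-1)

lemma pvTriple_append (l : List Int) (h : 2 ≤ l.length) (x : Int) :
    pvTriple (l ++ [x]) = pvTriple l + (pvLastD l - pvPrevD l) * (x - pvLastD l) := by
  induction l with
  | nil => simp at h
  | cons a t ih =>
      match t with
      | [] => simp at h
      | [b] => simp [pvTriple, pvLastD, pvPrevD]
      | b :: c :: t' =>
          have h2 : 2 ≤ (b :: c :: t').length := by simp
          have := ih h2
          simp only [List.cons_append, pvTriple] at *
          rw [this]
          have hl : pvLastD (a :: b :: c :: t') = pvLastD (b :: c :: t') := by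
            simp [pvLastD]
          have hp : pvPrevD (a :: b :: c :: t') = pvPrevD (b :: c :: t') := by
            simp [pvPrevD, List.getLastD]
          rw [hl, hp]; ring

lemma pvTriple_close (l : List Int) (hh : l.head? = some (-1)) (n : Int) :
    pvTriple (l ++ [n]) = pvTriple l + (n - pvLastD l) * (pvLastD l - pvPrevD l) := by
  match l with
  | [] => simp at hh
  | [a] =>
      have : a = -1 := by simpa using hh
      subst this
      simp [pvTriple, pvLastD, pvPrevD]
  | a :: b :: t =>
      rw [pvTriple_append (a :: b :: t) (by simp) n]; ring

-- Nat-indexed term of A's inner loop, and its sum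
def pvT (b : List Int) (k : Nat) : Int :=
  (b.getD (k+1) 0 - b.getD k 0) * (b.getD (k+2) 0 - b.getD (k+1) 0)

lemma pvT_sum (b : List Int) :
    ((List.range (b.length - 2)).map (pvT b)).sum = pvTriple b := by
  induction b with
  | nil => simp [pvTriple]
  | cons a t ih =>
      match t with
      | [] => simp [pvTriple]
      | [x] => simp [pvTriple]
      | x :: y :: t' =>
          have hlen : (a :: x :: y :: t').length - 2 = (t'.length + 1) := by simp
          rw [hlen, List.range_succ_eq_map]
          simp only [List.map_cons, List.map_map, List.sum_cons]
          have hterm : pvT (a :: x :: y :: t') 0 = (x - a) * (y - x) := by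
            simp [pvT]
          have hshift : (List.range t'.length).map (pvT (a :: x :: y :: t') ∘ Nat.succ)
              = (List.range t'.length).map (pvT (x :: y :: t')) := by
            apply List.map_congr_left
            intro k hk
            simp [pvT]
          rw [hterm, hshift]
          have : (x :: y :: t').length - 2 = t'.length := by simp
          rw [this] at ih
          rw [ih]
          simp [pvTriple]

lemma pvInnerA_eq_sum (b : List Int) (acc : Int) :
    pvInnerA b acc = acc + ((List.range (b.length - 2)).map (pvT b)).sum := by
  unfold pvInnerA
  rw [PySem.List.foldl_add]
  congr 1
  rw [PySem.List.pyRange_one]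
  have hn : (((b.length : Int) - 1) - 1).toNat = b.length - 2 := by omega
  rw [hn, List.map_map]
  apply congrArg List.sum
  apply List.map_congr_left
  intro k _
  have e1 : (1 : Int) + (k : Int) = ((k + 1 : Nat) : Int) := by push_cast; ring
  have e2 : ((k + 1 : Nat) : Int) - 1 = ((k : Nat) : Int) := by push_cast; ring
  have e3 : ((k + 1 : Nat) : Int) + 1 = ((k + 2 : Nat) : Int) := by push_cast; ring
  simp only [Function.comp_apply, e1, e2, e3, PySem.List.pyGetD_natCast]
  rfl

lemma pvInnerA_eq (b : List Int) (acc : Int) : pvInnerA b acc = acc + pvTriple b := by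
  rw [pvInnerA_eq_sum, pvT_sum]

lemma pvGetD_set_ne' {α : Type} (xs : List α) (c c' : Nat) (v d : α) (h : c ≠ c') :
    (xs.set c v).getD c' d = xs.getD c' d := by
  rw [List.getD_eq_getElem?_getD, List.getD_eq_getElem?_getD, List.getElem?_set_ne h]

lemma pvGetD_set_self' {α : Type} (xs : List α) (c : Nat) (v d : α) (h : c < xs.length) :
    (xs.set c v).getD c d = v := by
  rw [List.getD_eq_getElem?_getD, List.getElem?_set_self h]; rfl

lemma pvSum_set (n : Nat) (xs : List (List Int)) (g : List Int → Int) (c : Nat) (v : List Int)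
    (hc : c < n) (hcx : c < xs.length) :
    ((List.range n).map (fun c' => g ((xs.set c v).getD c' []))).sum
      = ((List.range n).map (fun c' => g (xs.getD c' []))).sum + g v - g (xs.getD c []) := by
  induction n with
  | zero => omega
  | succ m ih =>
      rw [List.range_succ]
      by_cases hcm : c = m
      · subst hcm
        have hpre : (List.range c).map (fun c' => g ((xs.set c v).getD c' []))
            = (List.range c).map (fun c' => g (xs.getD c' [])) := by
          apply List.map_congr_left
          intro k hk
          have hne : c ≠ k := by simp at hk; omega
          rw [pvGetD_set_ne' xs c k v [] hne]
        have hlast : (xs.set c v).getD c [] = v := pvGetD_set_self' xs c v [] hcx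
        simp only [List.map_append, List.sum_append, List.map_cons, List.map_nil,
          List.sum_cons, List.sum_nil, hpre, hlast]
        ring
      · have hlast : (xs.set c v).getD m [] = xs.getD m [] :=
          pvGetD_set_ne' xs c m v [] hcm
        have := ih (by omega)
        simp only [List.map_append, List.sum_append, List.map_cons, List.map_nil,
          List.sum_cons, List.sum_nil, hlast, this]
        ring

lemma pvMap_sum_getD (xs : List (List Int)) (g : List Int → Int) :
    (xs.map g).sum = ((List.range xs.length).map (fun c => g (xs.getD c []))).sum := by
  induction xs with
  | nil => simp
  | cons x t ih =>
      simp only [List.map_cons, List.sum_cons, List.length_cons, List.range_succ_eq_map,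
        List.map_map, ih]
      congr 1

-- loop invariant tying A's buckets to B's (last, prev, count) state
def pvInv (bk : List (List Int)) (last prev : List Int) (count : Int) : Prop :=
  bk.length = 26 ∧ last.length = 26 ∧ prev.length = 26 ∧
  (∀ c, c < 26 → (bk.getD c []).head? = some (-1) ∧
      last.getD c 0 = pvLastD (bk.getD c []) ∧ prev.getD c 0 = pvPrevD (bk.getD c [])) ∧
  count = ((List.range 26).map (fun c => pvTriple (bk.getD c []))).sum

lemma pvInv_step (bk : List (List Int)) (last prev : List Int) (count : Int)
    (hInv : pvInv bk last prev count) (i : Int) (ch : Char)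
    (h1 : 39 ≤ ch.toNat) (h2 : ch.toNat ≤ 90) :
    pvInv (pvStepA bk (i, ch)) (pvStepB (last, prev, count) (i, ch)).1
      (pvStepB (last, prev, count) (i, ch)).2.1 (pvStepB (last, prev, count) (i, ch)).2.2 := by
  obtain ⟨hbk, hla, hpr, hcls, hcnt⟩ := hInv
  have hc26 := pvCIdx_lt ch h1 h2
  set c := pvCIdx ch with hcdef
  set l := bk.getD c [] with hldef
  have hA : pvStepA bk (i, ch) = bk.set c (l ++ [i]) := by
    unfold pvStepA
    rw [pvPyGetD_code bk [] hbk ch h1 h2, pvPySetD_code bk _ hbk ch h1 h2]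
  have hB1 : (pvStepB (last, prev, count) (i, ch)).1 = last.set c i := by
    show PySem.List.pySetD last _ i = _
    rw [pvPySetD_code last i hla ch h1 h2]
  have hB2 : (pvStepB (last, prev, count) (i, ch)).2.1 = prev.set c (pvLastD l) := by
    show PySem.List.pySetD prev _ _ = _
    rw [pvPySetD_code prev _ hpr ch h1 h2, pvPyGetD_code last 0 hla ch h1 h2,
      (hcls c hc26).2.1]
  have hB3 : (pvStepB (last, prev, count) (i, ch)).2.2
      = count + (pvLastD l - pvPrevD l) * (i - pvLastD l) := by
    show count + _ * _ = _
    rw [pvPyGetD_code last 0 hla ch h1 h2, pvPyGetD_code prev 0 hpr ch h1 h2,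
      (hcls c hc26).2.1, (hcls c hc26).2.2]
  rw [hA, hB1, hB2, hB3]
  have hlne : l ≠ [] := by
    intro h
    have := (hcls c hc26).1
    rw [← hldef, h] at this; simp at this
  refine ⟨by simp [hbk], by simp [hla], by simp [hpr], ?_, ?_⟩
  · intro c' hc'
    by_cases hne : c = c'
    · subst hne
      rw [pvGetD_set_self' bk c (l ++ [i]) [] (by omega),
          pvGetD_set_self' last c i 0 (by omega),
          pvGetD_set_self' prev c (pvLastD l) 0 (by omega)]
      refine ⟨?_, ?_, ?_⟩
      · rw [List.head?_append_of_ne_nil _ hlne]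
        exact (hcls c hc26).1
      · simp [pvLastD]
      · simp [pvPrevD, pvLastD]
    · rw [pvGetD_set_ne' bk c c' _ [] hne, pvGetD_set_ne' last c c' _ 0 hne,
          pvGetD_set_ne' prev c c' _ 0 hne]
      exact hcls c' hc'
  · rw [pvSum_set 26 bk (fun b => pvTriple b) c (l ++ [i]) hc26 (by omega), ← hcnt]
    have hdiff : pvTriple (l ++ [i]) - pvTriple l
        = (pvLastD l - pvPrevD l) * (i - pvLastD l) := by
      match hl2 : l with
      | [a] =>
          have ha : a = -1 := by
            have := (hcls c hc26).1
            rw [← hldef] at this; simp at this; omega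
          subst ha
          simp [pvTriple, pvLastD, pvPrevD]
      | a :: b :: t =>
          rw [pvTriple_append (a :: b :: t) (by simp) i]; ring
    rw [← hldef]
    linarith [hdiff]

lemma pvSim (xs : List Char) :
    (∀ ch ∈ xs, 39 ≤ ch.toNat ∧ ch.toNat ≤ 90) →
    ∀ (s0 : Int) (bk : List (List Int)) (last prev : List Int) (count : Int),
      pvInv bk last prev count →
      pvInv ((PySem.List.enumerate xs s0).foldl pvStepA bk)
        (((PySem.List.enumerate xs s0).foldl pvStepB (last, prev, count)).1)
        (((PySem.List.enumerate xs s0).foldl pvStepB (last, prev, count)).2.1)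
        (((PySem.List.enumerate xs s0).foldl pvStepB (last, prev, count)).2.2) := by
  induction xs with
  | nil => intro _ s0 bk last prev count h; simpa [PySem.List.enumerate] using h
  | cons x t ih =>
      intro hxs s0 bk last prev count h
      have hx := hxs x (List.mem_cons_self ..)
      have ht : ∀ ch ∈ t, 39 ≤ ch.toNat ∧ ch.toNat ≤ 90 :=
        fun ch hc => hxs ch (List.mem_cons_of_mem _ hc)
      rw [PySem.List.enumerate_cons]
      simp only [List.foldl_cons]
      exact ih ht (s0 + 1) _ _ _ _ (pvInv_step bk last prev count h s0 x hx.1 hx.2)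

lemma pvInv_init :
    pvInv ((List.range 26).map fun _ => [(-1 : Int)])
      (List.replicate 26 (-1)) (List.replicate 26 (-1)) 0 := by
  unfold pvInv pvLastD pvPrevD
  decide

-- ===== VERDICT (by name: the statement is the Claim_ definition above) =====
theorem count_unique_letter_string_spec : Claim_equal_count_unique_letter_string := by
  intro s _ hpre
  unfold Spec_count_unique_letter_string
  unfold count_unique_letter_string count_unique_letter_string_alt
  dsimp only
  have hchars : ∀ ch ∈ s.toList, 39 ≤ ch.toNat ∧ ch.toNat ≤ 90 := by
    intro ch hch
    have := List.all_eq_true.mp hpre ch hch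
    simpa using this
  have hInv := pvSim s.toList hchars 0 _ _ _ _ pvInv_init
  obtain ⟨hbk, hla, hpr, hcls, hcnt⟩ := hInv
  set n : Int := (s.toList.length : Int) with hn
  set bucket := (PySem.List.enumerate s.toList 0).foldl pvStepA
      ((List.range 26).map fun _ => [(-1 : Int)]) with hbdef
  set st := (PySem.List.enumerate s.toList 0).foldl pvStepB
      (List.replicate 26 (-1), List.replicate 26 (-1), 0) with hstdef
  congr 1
  -- A side
  have hA : (PySem.List.pyRange 0 (((bucket.map (fun b => b ++ [n])).length : Int)) 1).foldl
      (fun acc i => pvInnerA (PySem.List.pyGetD (bucket.map (fun b => b ++ [n])) i []) acc) 0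
      = ((List.range 26).map (fun c => pvTriple (bucket.getD c [] ++ [n]))).sum := by
    simp only [pvInnerA_eq]
    rw [PySem.List.foldl_pyRange_zero_pyGetD' (bucket.map (fun b => b ++ [n])) []
      (fun acc b => acc + pvTriple b) 0]
    rw [PySem.List.foldl_add, List.map_map, pvMap_sum_getD, hbk]
    simp [Function.comp_apply]
  rw [hA]
  -- B side
  have hB : (PySem.List.pyRange 0 26 1).foldl
      (fun acc c => acc + (n - PySem.List.pyGetD st.1 c 0)
                        * (PySem.List.pyGetD st.1 c 0 - PySem.List.pyGetD st.2.1 c 0)) st.2.2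
      = st.2.2 + ((List.range 26).map (fun k => (n - pvLastD (bucket.getD k []))
                        * (pvLastD (bucket.getD k []) - pvPrevD (bucket.getD k [])))).sum := by
    rw [PySem.List.foldl_add]
    congr 1
    have h26 : (26 : Int) = ((26 : Nat) : Int) := by norm_num
    rw [h26, PySem.List.pyRange_zero_nat, List.map_map]
    apply congrArg List.sum
    apply List.map_congr_left
    intro k hk
    have hk26 : k < 26 := by simpa using hk
    have e1 : PySem.List.pyGetD st.1 (k : Int) 0 = pvLastD (bucket.getD k []) := by
      rw [PySem.List.pyGetD_natCast]
      exact (hcls k hk26).2.1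
    have e2 : PySem.List.pyGetD st.2.1 (k : Int) 0 = pvPrevD (bucket.getD k []) := by
      rw [PySem.List.pyGetD_natCast]
      exact (hcls k hk26).2.2
    simp only [Function.comp_apply, e1, e2]
  rw [hB, hcnt]
  -- per-class closing term
  have hclose : (List.range 26).map (fun c => pvTriple (bucket.getD c [] ++ [n]))
      = (List.range 26).map (fun c => pvTriple (bucket.getD c [])
          + (n - pvLastD (bucket.getD c [])) * (pvLastD (bucket.getD c []) - pvPrevD (bucket.getD c []))) := by
    apply List.map_congr_left
    intro k hk
    have hk26 : k < 26 := by simpa using hk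
    exact pvTriple_close _ (hcls k hk26).1 n
  rw [hclose, PySem.List.sum_map_add_int]
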